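-- pv_equiv track=rewrite | github.com/mmshihov/discrete-math | code/python/kvain-petrick.py | petrickTransformCondition
-- ===== SOURCE A (Python) =====
-- def isSymInList(sym, list):
--     for elem in list:
--         if (sym == elem):
--             return True
--     return False
--
-- def isEats(dizWho, dizWhom):
--     for sym in dizWho:
--         if (not isSymInList(sym, dizWhom)):
--             return False
--     return True
--
-- def petrickTransformCondition(condition):
--     copy = []
--     for list in condition:
--         copy.append(list)
--     for list in condition:
--         i = 0
--         isItWasEat = False
--         while (i < len(copy)):
--             if (isEats(list, copy[i])):
--                 copy[i:i+1] = []
--                 isItWasEat = True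
--             else:
--                 i = i + 1
--         if (isItWasEat):
--             copy.append(list)
--     return copy
-- ===== SOURCE B (Python) =====
-- # Absorption by filtering: keep a term iff no other term's symbol-set is a
-- # proper subset of it, and it is the last occurrence among set-equal terms.
-- def petrickTransformCondition(condition):
--     def issubset(s, t):
--         return all(x in t for x in s)
--     out = []
--     rest = condition
--     for t in condition:
--         rest = rest[1:]
--         dominated = any(issubset(s, t) and not issubset(t, s) for s in condition)
--         dup_later = any(issubset(t, k) and issubset(k, t) for k in rest)
--         if not dominated and not dup_later:
--             out.append(t)
--     return out
-- ===== Notes on version B (the rewrite author's own statement) =====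
-- stated objective: simpler
-- what changed: A simulates absorption destructively (for each term, an inner while loop splices superset terms out of a working copy and re-appends the eater); B computes the same result in one declarative filtering pass, keeping a term iff no term's symbol-set is a proper subset of it and it is the last occurrence among set-equal terms.
import Mathlib
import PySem

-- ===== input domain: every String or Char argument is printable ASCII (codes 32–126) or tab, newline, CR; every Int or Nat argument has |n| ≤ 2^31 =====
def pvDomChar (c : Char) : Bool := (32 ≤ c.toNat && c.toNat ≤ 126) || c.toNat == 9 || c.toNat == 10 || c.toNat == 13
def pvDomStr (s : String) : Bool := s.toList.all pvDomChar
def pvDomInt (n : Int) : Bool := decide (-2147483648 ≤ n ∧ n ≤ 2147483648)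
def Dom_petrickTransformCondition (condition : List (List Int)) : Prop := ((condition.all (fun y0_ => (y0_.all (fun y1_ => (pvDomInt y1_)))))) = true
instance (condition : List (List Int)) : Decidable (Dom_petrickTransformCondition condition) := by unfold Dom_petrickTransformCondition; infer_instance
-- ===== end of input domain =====

-- B replaces A's destructive remove-and-reappend simulation by a single filtering
-- pass (keep a term iff no proper symbol-subset exists and it is the last
-- set-equal occurrence); objective: simpler. Return value only (A does not mutate its argument).

-- ===== PORT A =====
def isSymInList (sym : Int) (l : List Int) : Bool :=
  match l with
  | [] => false
  | e :: rest => if sym == e then true else isSymInList sym rest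

def isEats (dizWho dizWhom : List Int) : Bool :=
  match dizWho with
  | [] => true
  | s :: rest => if !(isSymInList s dizWhom) then false else isEats rest dizWhom

def eatLoop (l : List Int) (copy : List (List Int)) (i : Nat) (flag : Bool) :
    List (List Int) × Bool :=
  if h : i < copy.length then
    if isEats l copy[i] then
      eatLoop l (copy.take i ++ copy.drop (i + 1)) i true
    else
      eatLoop l copy (i + 1) flag
  else
    (copy, flag)
termination_by copy.length - i
decreasing_by
  · simp
    omega
  · omega

def petrickTransformCondition (condition : List (List Int)) : List (List Int) :=
  let copy := condition.foldl (fun acc l => acc ++ [l]) []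
  condition.foldl (fun copy l =>
    let r := eatLoop l copy 0 false
    if r.2 then r.1 ++ [l] else r.1) copy

-- ===== PORT B =====
def issubset (s t : List Int) : Bool := s.all (fun x => t.contains x)

def petrickTransformCondition_alt (condition : List (List Int)) : List (List Int) :=
  (condition.foldl (fun (st : List (List Int) × List (List Int)) t =>
    let rest := st.1.drop 1
    let dominated := condition.any (fun s => issubset s t && !(issubset t s))
    let dup_later := rest.any (fun k => issubset t k && issubset k t)
    (rest, if !dominated && !dup_later then st.2 ++ [t] else st.2))
    (condition, [])).2

-- ===== PRECONDITION & SPEC =====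
def Spec_petrickTransformCondition (condition : List (List Int)) (out : List (List Int)) : Prop := out = petrickTransformCondition_alt condition
instance (condition : List (List Int)) (out : List (List Int)) : Decidable (Spec_petrickTransformCondition condition out) := by unfold Spec_petrickTransformCondition; infer_instance

-- ===== CLAIM (what is proved, stated in full; the proofs are below) =====
def Claim_equal_petrickTransformCondition : Prop := ∀ (condition : List (List Int)), Dom_petrickTransformCondition condition → Spec_petrickTransformCondition condition (petrickTransformCondition condition)

-- ===== LEMMAS AND PROOFS =====
lemma isSymInList_eq (sym : Int) (l : List Int) : isSymInList sym l = l.contains sym := by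
  induction l with
  | nil => rfl
  | cons e rest ih => by_cases h : sym = e <;> simp [isSymInList, h, ih]

lemma isEats_eq (who whom : List Int) : isEats who whom = issubset who whom := by
  induction who with
  | nil => rfl
  | cons s rest ih =>
      cases hc : whom.contains s <;>
        simp [isEats, isSymInList_eq, ih, issubset, List.all_cons]

lemma issubset_iff (s t : List Int) : issubset s t = true ↔ ∀ x ∈ s, x ∈ t := by
  simp [issubset]

lemma issubset_refl (s : List Int) : issubset s s = true := by
  simp [issubset_iff]

lemma issubset_trans {a b c : List Int} (h1 : issubset a b = true) (h2 : issubset b c = true) :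
    issubset a c = true := by
  rw [issubset_iff] at *
  exact fun x hx => h2 x (h1 x hx)

def psub (s t : List Int) : Bool := issubset s t && !(issubset t s)

def seteq (s t : List Int) : Bool := issubset s t && issubset t s

lemma psub_irrefl (t : List Int) : psub t t = false := by
  simp [psub, issubset_refl]

lemma psub_trans_left {s t e : List Int} (h1 : psub s t = true) (h2 : issubset t e = true) :
    psub s e = true := by
  simp only [psub, Bool.and_eq_true, Bool.not_eq_true'] at *
  refine ⟨issubset_trans h1.1 h2, ?_⟩
  by_contra hc
  simp only [Bool.not_eq_false] at hc
  exact absurd (issubset_trans h2 hc) (by simp [h1.2])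

def stepA (copy : List (List Int)) (t : List Int) : List (List Int) :=
  let c' := copy.filter (fun e => !issubset t e)
  if copy.any (fun e => issubset t e) then c' ++ [t] else c'

def gstep (st : List (List Int) × List (List Int)) (t : List Int) :
    List (List Int) × List (List Int) :=
  (st.1 ++ [t],
   if st.1.all (fun s => !psub s t) then st.2.filter (fun e => !issubset t e) ++ [t] else st.2)

def Ffront (condition P : List (List Int)) : List (List Int) :=
  condition.filter (fun e => !(P.any (fun s => issubset s e)))

def gsel (P : List (List Int)) : List (List Int) → List (List Int)
  | [] => []
  | t :: R =>
      (if P.all (fun s => !psub s t) && R.all (fun s => !issubset s t) then [t] else []) ++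
        gsel (P ++ [t]) R

def gselAlt (condition : List (List Int)) : List (List Int) → List (List Int)
  | [] => []
  | t :: R =>
      (if !(condition.any (fun s => issubset s t && !(issubset t s))) &&
          !(R.any (fun k => issubset t k && issubset k t)) then [t] else []) ++
        gselAlt condition R

lemma eatLoop_eq (l : List Int) (copy : List (List Int)) (i : Nat) (flag : Bool) :
    eatLoop l copy i flag =
      (copy.take i ++ (copy.drop i).filter (fun e => !isEats l e),
       flag || (copy.drop i).any (fun e => isEats l e)) := by
  fun_induction eatLoop l copy i flag with
  | case1 copy i flag h heats ih =>
      rw [ih]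
      have hd : copy.drop i = copy[i] :: copy.drop (i + 1) := List.drop_eq_getElem_cons h
      have ht : (copy.take i ++ copy.drop (i + 1)).take i = copy.take i := by
        rw [List.take_append_of_le_length (by simp; omega)]
        simp [List.take_take]
      have hdd : (copy.take i ++ copy.drop (i + 1)).drop i = copy.drop (i + 1) := by
        rw [List.drop_append_of_le_length (by simp; omega)]
        simp
      rw [ht, hdd, hd, List.filter_cons, List.any_cons]
      simp only [heats, Bool.not_true, Bool.false_eq_true, if_false, Bool.true_or, Bool.or_true]
  | case2 copy i flag h heats ih =>
      simp only [Bool.not_eq_true] at heats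
      rw [ih]
      have hd : copy.drop i = copy[i] :: copy.drop (i + 1) := List.drop_eq_getElem_cons h
      have ht : copy.take (i + 1) = copy.take i ++ [copy[i]] := by
        rw [List.take_add_one]
        simp [List.getElem?_eq_getElem h]
      rw [ht, hd, List.filter_cons, List.any_cons]
      simp only [heats, Bool.not_false, if_true, Bool.false_or, List.append_assoc,
        List.singleton_append]
  | case3 copy i flag h =>
      have h1 : copy.drop i = [] := List.drop_eq_nil_of_le (Nat.le_of_not_lt h)
      have h2 : copy.take i = copy := List.take_of_length_le (Nat.le_of_not_lt h)
      rw [h1, h2]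
      simp

lemma body_eq :
    (fun (copy : List (List Int)) (l : List Int) =>
      let r := eatLoop l copy 0 false
      if r.2 then r.1 ++ [l] else r.1) = stepA := by
  funext copy l
  simp [eatLoop_eq, stepA, isEats_eq]

lemma Ffront_snoc (condition P : List (List Int)) (t : List Int) :
    Ffront condition (P ++ [t]) = (Ffront condition P).filter (fun e => !issubset t e) := by
  simp only [Ffront, List.filter_filter]
  apply List.filter_congr
  intro e _
  simp [List.any_append, Bool.and_comm]

-- the flag of the inner loop at step t equals "no element of P is a proper subset of t"

lemma flag_eq (condition P R g : List (List Int)) (t : List Int)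
    (hC : condition = P ++ t :: R)
    (H1 : ∀ e ∈ g, ∀ s ∈ P, psub s e = false)
    (H2 : ∀ u, (∀ s ∈ P, psub s u = false) → (∃ s ∈ P, seteq s u = true) →
          ∃ e ∈ g, seteq u e = true) :
    (Ffront condition P ++ g).any (fun e => issubset t e) = P.all (fun s => !psub s t) := by
  cases hall : P.all (fun s => !psub s t) with
  | true =>
      simp only [List.all_eq_true, Bool.not_eq_true'] at hall
      rw [List.any_eq_true]
      cases hsub : P.any (fun s => issubset s t) with
      | true =>
          rw [List.any_eq_true] at hsub
          obtain ⟨s, hs, hsub⟩ := hsub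
          have hse : seteq s t = true := by
            have := hall s hs
            simp only [psub, hsub, Bool.true_and, Bool.not_eq_false'] at this
            simp [seteq, hsub, this]
          obtain ⟨e, he, hte⟩ := H2 t hall ⟨s, hs, hse⟩
          refine ⟨e, List.mem_append_right _ he, ?_⟩
          simp only [seteq, Bool.and_eq_true] at hte
          exact hte.1
      | false =>
          refine ⟨t, List.mem_append_left _ ?_, issubset_refl t⟩
          simp only [Ffront, List.mem_filter]
          exact ⟨by rw [hC]; simp, by simp [hsub]⟩
  | false =>
      simp only [List.all_eq_false] at hall
      obtain ⟨s0, hs0, hps0⟩ := hall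
      replace hps0 : psub s0 t = true := by simpa using hps0
      rw [List.any_eq_false]
      intro e he
      rcases List.mem_append.mp he with hF | hg
      · simp only [Ffront, List.mem_filter, Bool.not_eq_true', List.any_eq_false] at hF
        intro hte
        have : issubset s0 e = true :=
          issubset_trans (by simp only [psub, Bool.and_eq_true] at hps0; exact hps0.1) hte
        simp [hF.2 s0 hs0] at this
      · intro hte
        have : psub s0 e = true := psub_trans_left hps0 hte
        simp [H1 e hg s0 hs0] at this

lemma seteq_symm (s t : List Int) : seteq s t = seteq t s := by
  simp [seteq, Bool.and_comm]

lemma sub_of_psub {s t : List Int} (h : psub s t = true) : issubset s t = true := by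
  simp only [psub, Bool.and_eq_true] at h; exact h.1

lemma sub_of_seteq {s t : List Int} (h : seteq s t = true) : issubset s t = true := by
  simp only [seteq, Bool.and_eq_true] at h; exact h.1

lemma main_inv (condition : List (List Int)) :
    ∀ (R P g : List (List Int)), condition = P ++ R →
    (∀ e ∈ g, ∀ s ∈ P, psub s e = false) →
    (∀ u, (∀ s ∈ P, psub s u = false) → (∃ s ∈ P, seteq s u = true) →
      ∃ e ∈ g, seteq u e = true) →
    R.foldl stepA (Ffront condition P ++ g) =
      Ffront condition (P ++ R) ++ (R.foldl gstep (P, g)).2 := by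
  intro R
  induction R with
  | nil => intro P g hC H1 H2; simp
  | cons t R' ih =>
      intro P g hC H1 H2
      have hflag := flag_eq condition P R' g t hC H1 H2
      set c := P.all (fun s => !psub s t) with hc
      have hstep : stepA (Ffront condition P ++ g) t =
          Ffront condition (P ++ [t]) ++
            (if c then g.filter (fun e => !issubset t e) ++ [t] else g) := by
        cases hcv : c with
        | true =>
            simp only [stepA, hflag, hcv, if_pos]
            rw [List.filter_append, Ffront_snoc, List.append_assoc]
        | false =>
            simp only [stepA, hflag, hcv, Bool.false_eq_true, if_false]
            rw [List.filter_append, Ffront_snoc]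
            congr 1
            apply List.filter_eq_self.mpr
            intro e he
            have : issubset t e = false := by
              have hax : ((Ffront condition P ++ g).any fun e => issubset t e) = false := by
                rw [hflag, hcv]
              rw [List.any_eq_false] at hax
              simpa using hax e (List.mem_append_right _ he)
            simp [this]
      have hC' : condition = (P ++ [t]) ++ R' := by simpa [List.append_assoc] using hC
      have H1' : ∀ e ∈ (if c then g.filter (fun e => !issubset t e) ++ [t] else g),
          ∀ s ∈ P ++ [t], psub s e = false := by
        cases hcv : c with
        | true =>
            simp only [if_pos]
            intro e he s hs
            rcases List.mem_append.mp he with hef | het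
            · rw [List.mem_filter] at hef
              rcases List.mem_append.mp hs with hsP | hst
              · exact H1 e hef.1 s hsP
              · rw [List.mem_singleton] at hst; subst hst
                by_contra hcn
                rw [Bool.not_eq_false] at hcn
                have := sub_of_psub hcn
                simp [this] at hef
            · rw [List.mem_singleton] at het; subst het
              rcases List.mem_append.mp hs with hsP | hst
              · have := hcv
                rw [hc, List.all_eq_true] at this
                simpa using this s hsP
              · rw [List.mem_singleton] at hst; subst hst
                exact psub_irrefl _
        | false =>
            simp only [Bool.false_eq_true, if_false]
            intro e he s hs
            have hex : ∃ s0 ∈ P, psub s0 t = true := by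
              have := hcv
              rw [hc, List.all_eq_false] at this
              obtain ⟨s0, hs0, h0⟩ := this
              exact ⟨s0, hs0, by simpa using h0⟩
            obtain ⟨s0, hs0, hps0⟩ := hex
            rcases List.mem_append.mp hs with hsP | hst
            · exact H1 e he s hsP
            · rw [List.mem_singleton] at hst; subst hst
              by_contra hcn
              rw [Bool.not_eq_false] at hcn
              have : psub s0 e = true := psub_trans_left hps0 (sub_of_psub hcn)
              simp [H1 e he s0 hs0] at this
      have H2' : ∀ u, (∀ s ∈ P ++ [t], psub s u = false) →
          (∃ s ∈ P ++ [t], seteq s u = true) →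
          ∃ e ∈ (if c then g.filter (fun e => !issubset t e) ++ [t] else g),
            seteq u e = true := by
        intro u hnp ⟨s, hs, hse⟩
        have hct : seteq t u = true → c = true := by
          intro htu
          by_contra hcf
          rw [Bool.not_eq_true, hc, List.all_eq_false] at hcf
          obtain ⟨s0, hs0, h0⟩ := hcf
          have hps0 : psub s0 t = true := by simpa using h0
          have : psub s0 u = true := psub_trans_left hps0 (sub_of_seteq htu)
          simp [hnp s0 (List.mem_append_left _ hs0)] at this
        have tcase : seteq t u = true →
            ∃ e ∈ (if c then g.filter (fun e => !issubset t e) ++ [t] else g),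
              seteq u e = true := by
          intro htu
          rw [hct htu]
          simp only [if_pos]
          exact ⟨t, List.mem_append_right _ (List.mem_singleton_self t),
            by rw [seteq_symm]; exact htu⟩
        rcases List.mem_append.mp hs with hsP | hst
        · have hnpP : ∀ s' ∈ P, psub s' u = false :=
            fun s' hs' => hnp s' (List.mem_append_left _ hs')
          obtain ⟨e, he, hue⟩ := H2 u hnpP ⟨s, hsP, hse⟩
          cases hcv : c with
          | false => exact ⟨e, by simp only [Bool.false_eq_true, if_false]; exact he, hue⟩
          | true =>
              cases hte : issubset t e with
              | false =>
                  refine ⟨e, ?_, hue⟩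
                  simp only [if_pos]
                  exact List.mem_append_left _ (List.mem_filter.mpr ⟨he, by simp [hte]⟩)
              | true =>
                  have htu : issubset t u = true := by
                    have heu : issubset e u = true := by
                      have := hue
                      simp only [seteq, Bool.and_eq_true] at this
                      exact this.2
                    exact issubset_trans hte heu
                  have hut : issubset u t = true := by
                    have := hnp t (List.mem_append_right _ (List.mem_singleton_self t))
                    simp only [psub, htu, Bool.true_and, Bool.not_eq_false'] at this
                    exact this
                  have h := tcase (by simp [seteq, htu, hut])
                  rwa [hcv] at h
        · rw [List.mem_singleton] at hst; subst hst
          exact tcase hse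
      calc (t :: R').foldl stepA (Ffront condition P ++ g)
          = R'.foldl stepA (stepA (Ffront condition P ++ g) t) := rfl
        _ = R'.foldl stepA (Ffront condition (P ++ [t]) ++
              (if c then g.filter (fun e => !issubset t e) ++ [t] else g)) := by rw [hstep]
        _ = Ffront condition ((P ++ [t]) ++ R') ++
              ((R'.foldl gstep (P ++ [t],
                if c then g.filter (fun e => !issubset t e) ++ [t] else g)).2) :=
            ih (P ++ [t]) _ hC' H1' H2'
        _ = Ffront condition (P ++ t :: R') ++ ((t :: R').foldl gstep (P, g)).2 := by
            rw [List.append_assoc]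
            rfl

lemma h1_step (P g : List (List Int)) (t : List Int)
    (H1 : ∀ e ∈ g, ∀ s ∈ P, psub s e = false) :
    ∀ e ∈ (if P.all (fun s => !psub s t) then g.filter (fun e => !issubset t e) ++ [t] else g),
      ∀ s ∈ P ++ [t], psub s e = false := by
  cases hcv : P.all (fun s => !psub s t) with
  | true =>
      simp only [if_pos]
      intro e he s hs
      rcases List.mem_append.mp he with hef | het
      · rw [List.mem_filter] at hef
        rcases List.mem_append.mp hs with hsP | hst
        · exact H1 e hef.1 s hsP
        · rw [List.mem_singleton] at hst; subst hst
          by_contra hcn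
          rw [Bool.not_eq_false] at hcn
          have := sub_of_psub hcn
          simp [this] at hef
      · rw [List.mem_singleton] at het; subst het
        rcases List.mem_append.mp hs with hsP | hst
        · rw [List.all_eq_true] at hcv
          simpa using hcv s hsP
        · rw [List.mem_singleton] at hst; subst hst
          exact psub_irrefl _
  | false =>
      simp only [Bool.false_eq_true, if_false]
      intro e he s hs
      rw [List.all_eq_false] at hcv
      obtain ⟨s0, hs0, h0⟩ := hcv
      have hps0 : psub s0 t = true := by simpa using h0
      rcases List.mem_append.mp hs with hsP | hst
      · exact H1 e he s hsP
      · rw [List.mem_singleton] at hst; subst hst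
        by_contra hcn
        rw [Bool.not_eq_false] at hcn
        have : psub s0 e = true := psub_trans_left hps0 (sub_of_psub hcn)
        simp [H1 e he s0 hs0] at this

lemma notsub_of_cfalse (P g : List (List Int)) (t : List Int)
    (hcf : P.all (fun s => !psub s t) = false)
    (H1 : ∀ e ∈ g, ∀ s ∈ P, psub s e = false) :
    ∀ e ∈ g, issubset t e = false := by
  intro e he
  rw [List.all_eq_false] at hcf
  obtain ⟨s0, hs0, h0⟩ := hcf
  have hps0 : psub s0 t = true := by simpa using h0
  by_contra hcn
  rw [Bool.not_eq_false] at hcn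
  have : psub s0 e = true := psub_trans_left hps0 hcn
  simp [H1 e he s0 hs0] at this

lemma gfold :
    ∀ (R P g : List (List Int)),
    (∀ e ∈ g, ∀ s ∈ P, psub s e = false) →
    (R.foldl gstep (P, g)).2 =
      g.filter (fun e => R.all (fun s => !issubset s e)) ++ gsel P R := by
  intro R
  induction R with
  | nil => intro P g H1; simp [gsel]
  | cons t R' ih =>
      intro P g H1
      have hstep : (t :: R').foldl gstep (P, g) =
          R'.foldl gstep (P ++ [t],
            if P.all (fun s => !psub s t) then g.filter (fun e => !issubset t e) ++ [t] else g) :=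
        rfl
      rw [hstep, ih _ _ (h1_step P g t H1)]
      cases hcv : P.all (fun s => !psub s t) with
      | true =>
          simp only [if_pos]
          rw [List.filter_append, List.filter_singleton]
          simp only [gsel, hcv, Bool.true_and]
          rw [List.filter_filter]
          have : (fun e => R'.all (fun s => !issubset s e) && !issubset t e) =
              (fun e => (t :: R').all (fun s => !issubset s e)) := by
            funext e
            simp [List.all_cons, Bool.and_comm]
          rw [this, List.append_assoc]
          simp [Bool.cond_eq_ite]
      | false =>
          simp only [Bool.false_eq_true, if_false]
          simp only [gsel, hcv, Bool.false_and]
          congr 1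
          apply List.filter_congr
          intro e he
          have := notsub_of_cfalse P g t hcv H1 e he
          simp [List.all_cons, this]

lemma all_and_split (l : List (List Int)) (p q : List Int → Bool) :
    l.all (fun x => p x && q x) = (l.all p && l.all q) := by
  induction l with
  | nil => rfl
  | cons a l ih =>
      simp only [List.all_cons, ih]
      cases p a <;> cases q a <;> cases l.all p <;> cases l.all q <;> rfl

lemma point_bool (s t : List Int) :
    (!issubset s t) = (!psub s t && !(issubset t s && issubset s t)) := by
  cases h1 : issubset s t <;> cases h2 : issubset t s <;> simp [psub, h1, h2]

lemma gsel_eq_gselAlt (condition : List (List Int)) :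
    ∀ (R P : List (List Int)), condition = P ++ R → gsel P R = gselAlt condition R := by
  intro R
  induction R with
  | nil => intro P hC; rfl
  | cons t R' ih =>
      intro P hC
      have hcond : (P.all (fun s => !psub s t) && R'.all (fun s => !issubset s t)) =
          (!(condition.any (fun s => issubset s t && !(issubset t s))) &&
           !(R'.any (fun k => issubset t k && issubset k t))) := by
        have e1 : ∀ (L : List (List Int)),
            (!(L.any (fun s => issubset s t && !(issubset t s)))) = L.all (fun s => !psub s t) := by
          intro L
          rw [List.not_any_eq_all_not]
          rfl
        rw [e1, hC, List.all_append, List.all_cons]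
        have e2 : (!psub t t) = true := by simp [psub_irrefl]
        rw [e2, Bool.true_and]
        have e3 : R'.all (fun s => !issubset s t) =
            (R'.all (fun s => !psub s t) && R'.all (fun s => !(issubset t s && issubset s t))) := by
          rw [← all_and_split]
          exact congrArg R'.all (funext fun s => point_bool s t)
        rw [e3, List.not_any_eq_all_not]
        have e4 : (fun k => !(issubset t k && issubset k t)) =
            (fun s => !(issubset t s && issubset s t)) := rfl
        rw [e4]
        cases P.all (fun s => !psub s t) <;>
          cases R'.all (fun s => !psub s t) <;>
          cases R'.all (fun s => !(issubset t s && issubset s t)) <;> rfl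
      show (if P.all (fun s => !psub s t) && R'.all (fun s => !issubset s t) then [t] else []) ++
            gsel (P ++ [t]) R' = _
      rw [hcond, ih (P ++ [t]) (by simpa [List.append_assoc] using hC)]
      rfl

def altstep (condition : List (List Int))
    (st : List (List Int) × List (List Int)) (t : List Int) :
    List (List Int) × List (List Int) :=
  let rest := st.1.drop 1
  let dominated := condition.any (fun s => issubset s t && !(issubset t s))
  let dup_later := rest.any (fun k => issubset t k && issubset k t)
  (rest, if !dominated && !dup_later then st.2 ++ [t] else st.2)

lemma altfold (condition : List (List Int)) :
    ∀ (R out : List (List Int)),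
    (R.foldl (altstep condition) (R, out)).2 = out ++ gselAlt condition R := by
  intro R
  induction R with
  | nil => intro out; simp [gselAlt]
  | cons t R' ih =>
      intro out
      have hred : altstep condition (t :: R', out) t =
          (R', if !(condition.any (fun s => issubset s t && !(issubset t s))) &&
                  !(R'.any (fun k => issubset t k && issubset k t))
               then out ++ [t] else out) := rfl
      rw [List.foldl_cons, hred, ih]
      cases hcv : (!(condition.any fun s => issubset s t && !(issubset t s)) &&
          !(R'.any fun k => issubset t k && issubset k t)) with
      | true => simp only [gselAlt, hcv, if_pos, List.append_assoc, List.singleton_append]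
      | false => simp only [gselAlt, hcv, Bool.false_eq_true, if_false, List.nil_append]

lemma final_eq (condition : List (List Int)) :
    petrickTransformCondition condition = petrickTransformCondition_alt condition := by
  unfold petrickTransformCondition
  rw [PySem.List.foldl_append_singleton, List.nil_append, body_eq]
  have h := main_inv condition condition [] [] rfl (by simp) (by simp)
  have h0 : Ffront condition [] = condition := by simp [Ffront]
  rw [h0, List.append_nil, List.nil_append] at h
  have h1 : Ffront condition condition = [] := by
    rw [Ffront, List.filter_eq_nil_iff]
    intro e he
    simp only [Bool.not_eq_true, Bool.not_eq_false', List.any_eq_true]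
    exact ⟨e, he, issubset_refl e⟩
  rw [h1, List.nil_append] at h
  rw [h, gfold condition [] [] (by simp)]
  simp only [List.filter_nil, List.nil_append]
  rw [gsel_eq_gselAlt condition condition [] rfl]
  have halt : petrickTransformCondition_alt condition =
      (condition.foldl (altstep condition) (condition, [])).2 := rfl
  rw [halt, altfold condition condition []]
  rfl

-- ===== VERDICT (by name: the statement is the Claim_ definition above) =====
theorem petrickTransformCondition_spec : Claim_equal_petrickTransformCondition := by
  intro condition _
  exact final_eq condition
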